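-- pv_equiv track=rewrite | github.com/ZeyuuLiu/SEAMiLab-Deconstructing-Amnesia | src/memory_eval/adapters/memos_adapter.py | find_memory_records
-- ===== SOURCE A (Python) =====
-- from typing import Any, Dict, List
--
-- def find_memory_records(
--
--     run_ctx: Any,
--     query: str,
--     f_key: List[str],
--     memory_corpus: List[Dict[str, Any]],
-- ) -> List[Dict[str, Any]]:
--     terms = {token.lower() for token in str(query or "").split() if token}
--     for key in f_key or []:
--         terms.update(token.lower() for token in str(key or "").split() if token)
--     ranked: List[tuple[int, Dict[str, Any]]] = []
--     for record in memory_corpus or []: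
--         text = str(record.get("text", "")).strip()
--         score = sum(1 for token in terms if token and token in text.lower())
--         if score > 0:
--             ranked.append((score, record))
--     ranked.sort(key=lambda x: x[0], reverse=True)
--     return [record for _, record in ranked[:100]]
-- ===== SOURCE B (Python) =====
-- def find_memory_records(run_ctx, query, f_key, memory_corpus):
--     tokens = str(query or "").split()
--     for key in f_key or []:
--         tokens += str(key or "").split()
--     terms = list(dict.fromkeys(tok.lower() for tok in tokens))
--
--     def score(record):
--         text = str(record.get("text", "")).strip().lower()
--         return sum(1 for t in terms if t in text)
--
--     # counting sort: a record's score is at most len(terms), so bucket by score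
--     buckets = [[] for _ in range(len(terms) + 1)]
--     for record in memory_corpus or []:
--         s = score(record)
--         if s > 0:
--             buckets[s].append(record)
--     result = []
--     for bucket in reversed(buckets[1:]):
--         result += bucket
--     return result[:100]
-- ===== Notes on version B (the rewrite author's own statement) =====
-- stated objective: faster
-- what changed: B collects the tokens into one flat list deduplicated in insertion order via dict.fromkeys (instead of A's set comprehension plus per-key set.update), and replaces A's collect-(score,record)-pairs-then-stable-reverse-sort with a counting sort: records are appended to per-score buckets (the score is bounded by the number of terms) and the buckets are concatenated highest score first
import Mathlib
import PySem

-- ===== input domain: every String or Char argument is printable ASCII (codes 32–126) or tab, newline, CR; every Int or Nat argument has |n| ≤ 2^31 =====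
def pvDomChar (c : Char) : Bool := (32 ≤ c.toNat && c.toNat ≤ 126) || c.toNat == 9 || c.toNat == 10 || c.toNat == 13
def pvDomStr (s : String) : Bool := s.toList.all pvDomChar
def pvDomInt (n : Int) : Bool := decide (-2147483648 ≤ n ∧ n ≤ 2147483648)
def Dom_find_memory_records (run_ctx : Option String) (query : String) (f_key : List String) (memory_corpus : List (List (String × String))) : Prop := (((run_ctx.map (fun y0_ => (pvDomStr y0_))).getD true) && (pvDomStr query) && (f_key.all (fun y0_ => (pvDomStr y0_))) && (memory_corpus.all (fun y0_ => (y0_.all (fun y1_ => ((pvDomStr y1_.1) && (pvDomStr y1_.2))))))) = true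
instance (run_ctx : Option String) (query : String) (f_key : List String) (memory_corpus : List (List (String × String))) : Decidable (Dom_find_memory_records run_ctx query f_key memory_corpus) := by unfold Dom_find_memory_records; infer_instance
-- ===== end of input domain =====

-- B collects the tokens into one flat list deduplicated in insertion order (dict.fromkeys), and
-- replaces A's collect-(score,record)-pairs-then-stable-reverse-sort with a counting sort over
-- per-score buckets concatenated highest score first — same return value; measurably faster.

-- ===== PORT A =====
def find_memory_records (run_ctx : Option String) (query : String) (f_key : List String) (memory_corpus : List (List (String × String))) : List (List (String × String)) :=
  let terms : PySem.Set String :=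
    List.foldl (fun s k => PySem.Set.update s (((PySem.Str.split₀ k).filter (fun t => !(t == ""))).map PySem.Str.lower))
      (PySem.Set.ofList (((PySem.Str.split₀ query).filter (fun t => !(t == ""))).map PySem.Str.lower)) f_key
  let ranked : List (Int × List (String × String)) :=
    List.foldl (fun acc record =>
      let text := PySem.Str.strip (PySem.Dict.getD (PySem.Dict.mk record) "text" "")
      let score : Int := (terms.map (fun token => if (!(token == "")) && PySem.Str.isIn token (PySem.Str.lower text) then (1:Int) else 0)).sum
      if 0 < score then acc ++ [(score, record)] else acc) [] memory_corpus
  ((PySem.List.sorted ranked (fun x => x.1) true).map (fun p => p.2)).take 100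

-- ===== PORT B =====
def find_memory_records_alt (run_ctx : Option String) (query : String) (f_key : List String) (memory_corpus : List (List (String × String))) : List (List (String × String)) :=
  let tokens : List String := List.foldl (fun acc key => acc ++ PySem.Str.split₀ key) (PySem.Str.split₀ query) f_key
  let terms : List String := PySem.List.dedup (tokens.map PySem.Str.lower)
  let score : List (String × String) → Nat := fun record =>
    terms.countP (fun t => PySem.Str.isIn t (PySem.Str.lower (PySem.Str.strip (PySem.Dict.getD (PySem.Dict.mk record) "text" ""))))
  let buckets0 : List (List (List (String × String))) := (List.range (terms.length + 1)).map (fun _ => [])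
  let buckets := List.foldl (fun bs record =>
      let s := score record
      if 0 < s then bs.set s ((bs.getD s []) ++ [record]) else bs) buckets0 memory_corpus
  let result := List.foldl (fun res bucket => res ++ bucket) [] (buckets.drop 1).reverse
  result.take 100

-- ===== PRECONDITION & SPEC =====
def Spec_find_memory_records (run_ctx : Option String) (query : String) (f_key : List String) (memory_corpus : List (List (String × String))) (out : List (List (String × String))) : Prop := out = find_memory_records_alt run_ctx query f_key memory_corpus
instance (run_ctx : Option String) (query : String) (f_key : List String) (memory_corpus : List (List (String × String))) (out : List (List (String × String))) : Decidable (Spec_find_memory_records run_ctx query f_key memory_corpus out) := by unfold Spec_find_memory_records; infer_instance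

-- ===== CLAIM (what is proved, stated in full; the proofs are below) =====
def Claim_equal_find_memory_records : Prop := ∀ (run_ctx : Option String) (query : String) (f_key : List String) (memory_corpus : List (List (String × String))), Dom_find_memory_records run_ctx query f_key memory_corpus → Spec_find_memory_records run_ctx query f_key memory_corpus (find_memory_records run_ctx query f_key memory_corpus)

-- ===== LEMMAS AND PROOFS =====

-- A's per-record score, exactly as A computes it (an Int sum of 0/1 over the terms)
def pvScoreInt (terms : List String) (record : List (String × String)) : Int :=
  let text := PySem.Str.strip (PySem.Dict.getD (PySem.Dict.mk record) "text" "")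
  (terms.map (fun token => if (!(token == "")) && PySem.Str.isIn token (PySem.Str.lower text) then (1:Int) else 0)).sum

-- B's per-record score (a Nat count over the terms, no emptiness guard)
def pvScoreN (terms : List String) (record : List (String × String)) : Nat :=
  terms.countP (fun t => PySem.Str.isIn t (PySem.Str.lower (PySem.Str.strip (PySem.Dict.getD (PySem.Dict.mk record) "text" ""))))

theorem pvScoreInt_eq (terms : List String) (record : List (String × String))
    (hT : ∀ t ∈ terms, t ≠ "") :
    pvScoreInt terms record = ((pvScoreN terms record : Nat) : Int) := by
  have hcp := List.countP_congr (l := terms)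
      (p := fun token => (!(token == "")) && PySem.Str.isIn token (PySem.Str.lower (PySem.Str.strip (PySem.Dict.getD (PySem.Dict.mk record) "text" ""))))
      (q := fun t => PySem.Str.isIn t (PySem.Str.lower (PySem.Str.strip (PySem.Dict.getD (PySem.Dict.mk record) "text" ""))))
      (by
        intro t ht
        have h1 : (t == "") = false := by simpa using hT t ht
        simp [h1])
  unfold pvScoreInt pvScoreN
  rw [PySem.List.sum_map_ite_one_zero, hcp]

theorem pvScoreN_le (terms : List String) (record : List (String × String)) :
    pvScoreN terms record ≤ terms.length :=
  List.countP_le_length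

-- tokens produced by str.split() are never empty
theorem pvGoNe (s cur : List Char) (acc : List (List Char))
    (hacc : ∀ t ∈ acc, t ≠ []) :
    ∀ t ∈ PySem.Chars.split₀.go s cur acc, t ≠ [] := by
  induction s generalizing cur acc with
  | nil =>
    intro t ht
    by_cases hc : cur.isEmpty
    · simp only [PySem.Chars.split₀.go, hc, if_true, List.mem_reverse] at ht
      exact hacc t ht
    · simp only [PySem.Chars.split₀.go, hc, Bool.false_eq_true, if_false, List.mem_reverse,
        List.mem_cons] at ht
      rcases ht with h | h
      · subst h
        simp only [ne_eq, List.reverse_eq_nil_iff]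
        intro h0
        simp [h0] at hc
      · exact hacc t h
  | cons c rest ih =>
    intro t ht
    by_cases hsp : PySem.Chars.isspace c
    · by_cases hc : cur.isEmpty
      · simp only [PySem.Chars.split₀.go, hsp, hc, if_true] at ht
        exact ih [] acc hacc t ht
      · simp only [PySem.Chars.split₀.go, hsp, hc, if_true, Bool.false_eq_true, if_false] at ht
        refine ih [] (cur.reverse :: acc) ?_ t ht
        intro u hu
        rcases List.mem_cons.mp hu with h | h
        · subst h
          simp only [ne_eq, List.reverse_eq_nil_iff]
          intro h0
          simp [h0] at hc
        · exact hacc u h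
    · simp only [PySem.Chars.split₀.go, hsp, Bool.false_eq_true, if_false] at ht
      exact ih (c :: cur) acc hacc t ht

theorem pvSplit₀Ne (s : String) : ∀ t ∈ PySem.Str.split₀ s, t ≠ "" := by
  intro t ht
  simp only [PySem.Str.split₀, List.mem_map] at ht
  obtain ⟨cs, hcs, rfl⟩ := ht
  have hne : cs ≠ [] := pvGoNe s.toList [] [] (by simp) cs hcs
  intro h0
  apply hne
  have : (String.ofList cs).toList = ("" : String).toList := by rw [h0]
  simpa using this

theorem pvLowerNe (t : String) (h : t ≠ "") : PySem.Str.lower t ≠ "" := by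
  intro h0
  apply h
  have h1 : (PySem.Str.lower t).toList = ("" : String).toList := by rw [h0]
  simp only [PySem.Str.toList_lower, PySem.Chars.lower] at h1
  have h2 : t.toList = [] := by simpa using h1
  have h3 := congrArg String.ofList h2
  simpa using h3

-- A's set of terms equals B's deduplicated term list
theorem pvFoldAddFlatten {α : Type} [BEq α] (chunks : List (List α)) (init : PySem.Set α) :
    List.foldl (fun s l => List.foldl PySem.Set.add s l) init chunks
      = List.foldl PySem.Set.add init chunks.flatten := by
  induction chunks generalizing init with
  | nil => rfl
  | cons c cs ih => simp [List.foldl_append, ih]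

theorem pvTokensEq (query : String) (f_key : List String) :
    List.foldl (fun acc key => acc ++ PySem.Str.split₀ key) (PySem.Str.split₀ query) f_key
      = PySem.Str.split₀ query ++ (f_key.map PySem.Str.split₀).flatten := by
  induction f_key using List.reverseRecOn with
  | nil => simp
  | append_singleton ks k ih => simp [List.foldl_append, ih]

theorem pvTermsEq (query : String) (f_key : List String) :
    (List.foldl (fun s k => PySem.Set.update s (((PySem.Str.split₀ k).filter (fun t => !(t == ""))).map PySem.Str.lower))
      (PySem.Set.ofList (((PySem.Str.split₀ query).filter (fun t => !(t == ""))).map PySem.Str.lower)) f_key : List String)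
    = PySem.List.dedup ((List.foldl (fun acc key => acc ++ PySem.Str.split₀ key) (PySem.Str.split₀ query) f_key).map PySem.Str.lower) := by
  have hfilter : ∀ s : String, (PySem.Str.split₀ s).filter (fun t => !(t == "")) = PySem.Str.split₀ s := by
    intro s
    apply List.filter_eq_self.mpr
    intro t ht
    simpa using pvSplit₀Ne s t ht
  simp only [hfilter]
  rw [pvTokensEq, PySem.List.dedup_eq_ofList]
  -- both sides become one foldl of Set.add over the lowered token stream
  have hupd : ∀ (s : PySem.Set String) (xs : List String), PySem.Set.update s xs = List.foldl PySem.Set.add s xs := fun _ _ => rfl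
  have hof : ∀ (xs : List String), (PySem.Set.ofList xs : List String) = List.foldl PySem.Set.add [] xs := fun _ => rfl
  simp only [hupd, hof]
  rw [List.map_append, List.foldl_append]
  have hA : (fun (s : PySem.Set String) k => List.foldl PySem.Set.add s ((PySem.Str.split₀ k).map PySem.Str.lower))
      = fun s k => (fun (s : PySem.Set String) l => List.foldl PySem.Set.add s l) s (((PySem.Str.split₀ k).map PySem.Str.lower)) := rfl
  rw [hA, ← List.foldl_map (g := fun (s : PySem.Set String) l => List.foldl PySem.Set.add s l)
        (f := fun k => (PySem.Str.split₀ k).map PySem.Str.lower),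
      pvFoldAddFlatten _ _]
  congr 1
  rw [List.map_flatten, List.map_map]
  rfl

theorem pvInsertBy_skip {α : Type} (before : α → α → Bool) (x : α) (as bs : List α)
    (h : ∀ a ∈ as, before x a = false) :
    PySem.List.insertBy before x (as ++ bs) = as ++ PySem.List.insertBy before x bs := by
  induction as with
  | nil => rfl
  | cons a as ih =>
    simp only [List.cons_append, PySem.List.insertBy, h a (by simp)]
    simp only [Bool.false_eq_true, if_false, List.cons.injEq, true_and]
    exact ih (fun a ha => h a (by simp [ha]))

theorem pvInsertBy_front {α : Type} (before : α → α → Bool) (x : α) (bs : List α)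
    (h : ∀ b ∈ bs, before x b = true) :
    PySem.List.insertBy before x bs = x :: bs := by
  cases bs with
  | nil => rfl
  | cons b bs => simp [PySem.List.insertBy, h b (by simp)]

theorem pvInsertBucket {α : Type} (key : α → Int) (x : α) (xs : List α) (ks : List Int)
    (hks : ks.Pairwise (· > ·)) (hmem : key x ∈ ks) :
    PySem.List.insertBy (fun a b => decide (key b < key a)) x
        (ks.flatMap (fun k => xs.filter (fun y => decide (key y = k))))
      = ks.flatMap (fun k => (xs ++ [x]).filter (fun y => decide (key y = k))) := by
  induction ks with
  | nil => simp at hmem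
  | cons k ks ih =>
    have hk : ∀ k' ∈ ks, k > k' := fun k' h => List.rel_of_pairwise_cons hks h
    simp only [List.flatMap_cons]
    by_cases hkey : key x = k
    · rw [pvInsertBy_skip _ _ _ _ (by
        intro a ha
        simp only [List.mem_filter, decide_eq_true_eq] at ha
        simp [ha.2, hkey])]
      rw [pvInsertBy_front _ _ _ (by
        intro b hb
        simp only [List.mem_flatMap, List.mem_filter, decide_eq_true_eq] at hb
        obtain ⟨k', hk', _, hbk'⟩ := hb
        simp [hbk', hkey, hk k' hk'])]
      have h1 : (xs ++ [x]).filter (fun y => decide (key y = k)) = xs.filter (fun y => decide (key y = k)) ++ [x] := by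
        simp [List.filter_append, hkey]
      have h2 : ks.flatMap (fun k' => (xs ++ [x]).filter (fun y => decide (key y = k'))) = ks.flatMap (fun k' => xs.filter (fun y => decide (key y = k'))) := by
        apply List.flatMap_congr
        intro k' hk'
        have : key x ≠ k' := by have := hk k' hk'; omega
        simp [List.filter_append, this]
      rw [h1, h2]
      simp
    · have hmem' : key x ∈ ks := by
        rcases List.mem_cons.mp hmem with h | h
        · exact absurd h hkey
        · exact h
      rw [pvInsertBy_skip _ _ _ _ (by
        intro a ha
        simp only [List.mem_filter, decide_eq_true_eq] at ha
        have hlt : key x < k := by have := hk _ hmem'; omega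
        simp [ha.2]; omega)]
      rw [ih hks.of_cons hmem']
      have h1 : (xs ++ [x]).filter (fun y => decide (key y = k)) = xs.filter (fun y => decide (key y = k)) := by
        simp [List.filter_append, hkey]
      rw [h1]

theorem pvCountsort {α : Type} (key : α → Int) (xs : List α) (ks : List Int)
    (hks : ks.Pairwise (· > ·)) (hx : ∀ x ∈ xs, key x ∈ ks) :
    PySem.List.sorted xs key true = ks.flatMap (fun k => xs.filter (fun y => decide (key y = k))) := by
  rw [PySem.List.sorted_rev_eq_foldl_insertBy]
  induction xs using List.reverseRecOn with
  | nil => simp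
  | append_singleton xs x ih =>
    rw [List.foldl_append]
    simp only [List.foldl_cons, List.foldl_nil]
    rw [ih (fun y hy => hx y (by simp [hy]))]
    exact pvInsertBucket key x xs ks hks (hx x (by simp))

-- the bucket fold builds, at index k ≥ 1, exactly the records of score k in input order
theorem pvBucketsInv {ρ : Type} (sc : ρ → Nat) (n : Nat) (hsc : ∀ r, sc r ≤ n) (corpus : List ρ) :
    List.foldl (fun bs r => if 0 < sc r then bs.set (sc r) ((bs.getD (sc r) []) ++ [r]) else bs)
        ((List.range (n+1)).map (fun _ => ([] : List ρ))) corpus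
      = (List.range (n+1)).map (fun k => if k = 0 then [] else corpus.filter (fun r => decide (sc r = k))) := by
  induction corpus using List.reverseRecOn with
  | nil => simp
  | append_singleton xs x ih =>
    rw [List.foldl_append, ih]
    simp only [List.foldl_cons, List.foldl_nil]
    by_cases hx : 0 < sc x
    · simp only [hx, if_true]
      have hlt : sc x < n + 1 := by have := hsc x; omega
      have hgetD : ((List.range (n+1)).map (fun k => if k = 0 then [] else xs.filter (fun r => decide (sc r = k)))).getD (sc x) [] = xs.filter (fun r => decide (sc r = sc x)) := by
        rw [List.getD_eq_getElem?_getD, List.getElem?_map, List.getElem?_range hlt]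
        simp only [Option.map_some, Option.getD_some]
        have : sc x ≠ 0 := by omega
        simp [this]
      rw [hgetD]
      apply List.ext_getElem
      · simp
      · intro i h1 h2
        simp only [List.getElem_set, List.getElem_map, List.getElem_range]
        by_cases hik : sc x = i
        · subst hik
          have : sc x ≠ 0 := by omega
          simp [this, List.filter_append]
        · simp only [hik, if_false]
          by_cases hi0 : i = 0
          · simp [hi0]
          · simp only [hi0, if_false]
            have : decide (sc x = i) = false := by simp [hik]
            simp [List.filter_append, this]
    · simp only [hx, if_false]
      apply List.map_congr_left
      intro k hk
      by_cases hk0 : k = 0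
      · simp [hk0]
      · have hd : decide (sc x = k) = false := by
          have h0 : sc x = 0 := by omega
          simp [h0]
          omega
        simp [hk0, List.filter_append, hd]

-- the two cleaned-up bodies agree (A's sorted pairs vs B's buckets), for any nonempty-term list
theorem pvAB (T : List String) (corpus : List (List (String × String)))
    (hT : ∀ t ∈ T, t ≠ "") :
    ((PySem.List.sorted
        (List.foldl (fun acc record =>
          if 0 < pvScoreInt T record then acc ++ [(pvScoreInt T record, record)] else acc) [] corpus)
        (fun x => x.1) true).map (fun p => p.2)).take 100
      = (List.foldl (fun res bucket => res ++ bucket) []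
          (((List.foldl (fun bs record =>
              if 0 < pvScoreN T record then bs.set (pvScoreN T record) ((bs.getD (pvScoreN T record) []) ++ [record]) else bs)
            ((List.range (T.length + 1)).map (fun _ => [])) corpus).drop 1).reverse)).take 100 := by
  have hse : ∀ r, pvScoreInt T r = ((pvScoreN T r : Nat) : Int) := fun r => pvScoreInt_eq T r hT
  simp only [hse]
  -- A side: ranked list as a filter-map
  have hstep : (fun (acc : List (Int × List (String × String))) r =>
      if 0 < ((pvScoreN T r : Nat) : Int) then acc ++ [(((pvScoreN T r : Nat) : Int), r)] else acc)
      = (fun acc r => if (fun r => decide (0 < ((pvScoreN T r : Nat) : Int))) r = true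
          then acc ++ [(fun r => (((pvScoreN T r : Nat) : Int), r)) r] else acc) := by
    funext acc r
    simp
  rw [hstep, PySem.List.foldl_append_if, List.nil_append]
  -- A side: the stable reverse sort is the descending concatenation of score classes
  rw [pvCountsort (fun p : Int × List (String × String) => p.1) _ (List.map (fun j : Nat => (j : Int)) (List.range' 1 T.length).reverse)
    (by
      rw [List.pairwise_map, List.pairwise_reverse]
      have := List.pairwise_lt_range' (s := 1) (n := T.length) (step := 1)
      refine this.imp ?_
      intro a b h
      exact_mod_cast h)
    (by
      intro x hx
      rcases List.mem_map.mp hx with ⟨r, hr, rfl⟩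
      rcases List.mem_filter.mp hr with ⟨_, hp⟩
      simp only [decide_eq_true_eq] at hp
      have h1 : 1 ≤ pvScoreN T r := by exact_mod_cast hp
      have h2 : pvScoreN T r ≤ T.length := pvScoreN_le T r
      refine List.mem_map.mpr ⟨pvScoreN T r, ?_, rfl⟩
      rw [List.mem_reverse]
      rw [List.mem_range'_1]
      omega)]
  -- B side: the bucket fold is the score-indexed table of filters
  rw [pvBucketsInv (pvScoreN T) T.length (pvScoreN_le T) corpus]
  -- B side: drop bucket 0, reverse, concatenate
  rw [List.range_eq_range', List.range'_succ, List.map_cons, List.drop_one, List.tail_cons]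
  rw [PySem.List.foldl_append_eq_flatten, List.nil_append]
  have hmapB : (List.range' 1 T.length 1).map
      (fun k => if k = 0 then [] else corpus.filter (fun r => decide (pvScoreN T r = k)))
      = (List.range' 1 T.length 1).map (fun k => corpus.filter (fun r => decide (pvScoreN T r = k))) := by
    apply List.map_congr_left
    intro k hk
    have h1 : 1 ≤ k := (List.mem_range'_1.mp hk).1
    have : ¬ (k = 0) := by omega
    simp [this]
  rw [hmapB, ← List.map_reverse, ← List.flatMap_def]
  -- A side: push map snd inside and identify each score class
  rw [List.map_flatMap, List.flatMap_map]
  congr 1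
  apply List.flatMap_congr
  intro j hj
  have h1 : 1 ≤ j := (List.mem_range'_1.mp (List.mem_reverse.mp hj)).1
  rw [List.filter_map, List.map_map, List.filter_filter]
  have hfe : List.filter
      (fun a => decide (((pvScoreN T a : Nat) : Int) = ((j : Nat) : Int)) &&
        decide (0 < ((pvScoreN T a : Nat) : Int))) corpus
      = List.filter (fun r => decide (pvScoreN T r = j)) corpus := by
    apply List.filter_congr
    intro r _
    by_cases h : pvScoreN T r = j
    · simp [h]
      omega
    · have : ¬ (((pvScoreN T r : Nat) : Int) = ((j : Nat) : Int)) := by exact_mod_cast h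
      simp [h, this]
  show List.map (fun r : List (String × String) => r)
      (List.filter (fun a => decide (((pvScoreN T a : Nat) : Int) = ((j : Nat) : Int)) &&
        decide (0 < ((pvScoreN T a : Nat) : Int))) corpus)
    = List.filter (fun r => decide (pvScoreN T r = j)) corpus
  rw [List.map_id', hfe]

theorem pv_main (run_ctx : Option String) (query : String) (f_key : List String) (memory_corpus : List (List (String × String))) :
    find_memory_records run_ctx query f_key memory_corpus = find_memory_records_alt run_ctx query f_key memory_corpus := by
  simp only [find_memory_records, find_memory_records_alt]
  rw [← pvTermsEq query f_key]
  exact pvAB _ memory_corpus (by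
    intro t ht
    -- every member of A's term set is the lowering of a nonempty split token
    have hmem : t ∈ (List.foldl (fun s k => PySem.Set.update s (((PySem.Str.split₀ k).filter (fun t => !(t == ""))).map PySem.Str.lower))
      (PySem.Set.ofList (((PySem.Str.split₀ query).filter (fun t => !(t == ""))).map PySem.Str.lower)) f_key : List String) := ht
    rw [pvTermsEq query f_key] at hmem
    rw [PySem.List.mem_dedup, List.mem_map] at hmem
    obtain ⟨u, hu, rfl⟩ := hmem
    -- u is a split token of the query or of some key, hence nonempty
    have htokne : ∀ (ks : List String) (init : List String), (∀ v ∈ init, v ≠ "") →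
        ∀ v ∈ List.foldl (fun acc key => acc ++ PySem.Str.split₀ key) init ks, v ≠ "" := by
      intro ks
      induction ks with
      | nil => intro init hinit v hv; exact hinit v hv
      | cons k ks ih =>
        intro init hinit v hv
        simp only [List.foldl_cons] at hv
        refine ih _ ?_ v hv
        intro w hw
        rcases List.mem_append.mp hw with h | h
        · exact hinit w h
        · exact pvSplit₀Ne k w h
    exact pvLowerNe u (htokne f_key _ (fun v hv => pvSplit₀Ne query v hv) u hu))

-- ===== VERDICT (by name: the statement is the Claim_ definition above) =====
theorem find_memory_records_spec : Claim_equal_find_memory_records := by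
  intro run_ctx query f_key memory_corpus _
  unfold Spec_find_memory_records
  exact pv_main run_ctx query f_key memory_corpus
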